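-- pv_equiv track=rewrite | github.com/rdinesh808/pylogicalprograms | pylogicalprograms/patterns/DineshNamePattern.py | print_n
-- ===== SOURCE A (Python) =====
-- def print_n(size):
--     start = 1
--     end = size + 1
--     n_lines = []
--     for i in range(start, end):
--         line = ""
--         for j in range(start, end):
--             if j == start or j == size or i==j:
--                 line += "* "
--             else:
--                 line += "  "
--         n_lines.append(line)
--     return n_lines
-- ===== SOURCE B (Python) =====
-- def print_n(size):
--     lines = []
--     for i in range(1, size + 1):
--         row = ["  "] * size
--         row[0] = "* "
--         row[size - 1] = "* "
--         row[i - 1] = "* "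
--         lines.append("".join(row))
--     return lines
-- ===== Notes on version B (the rewrite author's own statement) =====
-- stated objective: simpler
-- what changed: Replaces the inner per-column loop with three direct index writes (first column, last column, diagonal) into a preallocated row of blank cells, joined once per row.
import Mathlib
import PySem

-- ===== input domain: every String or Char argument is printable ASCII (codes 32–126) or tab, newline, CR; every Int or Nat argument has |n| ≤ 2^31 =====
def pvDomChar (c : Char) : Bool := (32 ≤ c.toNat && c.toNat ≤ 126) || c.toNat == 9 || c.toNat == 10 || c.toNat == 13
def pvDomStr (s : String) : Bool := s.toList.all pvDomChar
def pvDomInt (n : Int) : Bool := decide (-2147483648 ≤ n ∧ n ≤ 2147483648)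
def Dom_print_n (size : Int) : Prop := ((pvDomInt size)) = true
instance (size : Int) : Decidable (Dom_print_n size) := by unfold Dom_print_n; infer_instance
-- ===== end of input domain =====

-- B builds each row by three direct index writes into a preallocated list of blank cells
-- instead of A's inner per-column loop; objective: simpler.

-- ===== PORT A =====
def print_n (size : Int) : List String :=
  let start : Int := 1
  let end_ : Int := size + 1
  (PySem.List.pyRange start end_ 1).foldl (fun n_lines i =>
    let line := (PySem.List.pyRange start end_ 1).foldl (fun line j =>
      if j = start ∨ j = size ∨ i = j then line ++ "* " else line ++ "  ") ""
    n_lines ++ [line]) []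

-- ===== PORT B =====
-- row[0] / row[size-1] / row[i-1] are in range whenever the loop body runs (1 ≤ i ≤ size),
-- so pySetD is exact for Python's list assignment here.
def print_n_alt (size : Int) : List String :=
  (PySem.List.pyRange 1 (size + 1) 1).foldl (fun lines i =>
    let row := PySem.List.pyRepeat ["  "] size
    let row := PySem.List.pySetD row 0 "* "
    let row := PySem.List.pySetD row (size - 1) "* "
    let row := PySem.List.pySetD row (i - 1) "* "
    lines ++ [PySem.Str.join "" row]) []

-- ===== PRECONDITION & SPEC =====
def Spec_print_n (size : Int) (out : List String) : Prop := out = print_n_alt size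
instance (size : Int) (out : List String) : Decidable (Spec_print_n size out) := by unfold Spec_print_n; infer_instance

-- ===== CLAIM (what is proved, stated in full; the proofs are below) =====
def Claim_equal_print_n : Prop := ∀ (size : Int), Dom_print_n size → Spec_print_n size (print_n size)

-- ===== LEMMAS AND PROOFS =====

-- a foldl that appends one element per iteration is a map
theorem pv_foldl_app {α β : Type} (f : α → β) (l : List α) (acc : List β) :
    l.foldl (fun acc i => acc ++ [f i]) acc = acc ++ l.map f := by
  induction l generalizing acc with
  | nil => simp
  | cons x xs ih => simp [ih]

-- ''.join with empty separator is flatten, at the char-list level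
theorem pv_join_nil (l : List (List Char)) : PySem.Chars.join [] l = l.flatten := by
  show List.intercalate [] l = l.flatten
  simp [List.intercalate]
  induction l with
  | nil => rfl
  | cons x xs ih => cases xs <;> simp_all [List.intersperse]

-- a foldl that appends one string per iteration, at the char-list level
theorem pv_foldl_str (g : Int → String) (l : List Int) (s : String) :
    (l.foldl (fun line j => line ++ g j) s).toList
      = s.toList ++ (l.map (fun j => (g j).toList)).flatten := by
  induction l generalizing s with
  | nil => simp
  | cons x xs ih => simp [ih]

-- B's row of cells equals the list of cells A's inner loop walks through
theorem pv_row_eq (size i : Int) (h1 : 1 ≤ i) (h2 : i ≤ size) :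
    (PySem.List.pyRange 1 (size+1) 1).map
        (fun j => if j = 1 ∨ j = size ∨ i = j then "* " else "  ")
      = PySem.List.pySetD (PySem.List.pySetD (PySem.List.pySetD
          (PySem.List.pyRepeat ["  "] size) 0 "* ") (size-1) "* ") (i-1) "* " := by
  rw [PySem.List.pyRepeat_singleton,
      PySem.List.pySetD_of_nonneg _ _ (show (0:Int) ≤ i - 1 by omega),
      PySem.List.pySetD_of_nonneg _ _ (show (0:Int) ≤ size - 1 by omega),
      PySem.List.pySetD_of_nonneg _ _ (show (0:Int) ≤ 0 by omega)]
  apply List.ext_getElem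
  · simp [PySem.List.length_pyRange_one]
  · intro k hk1 hk2
    simp only [List.length_set, List.length_replicate] at hk2
    simp only [PySem.List.length_pyRange_one, List.length_map] at hk1
    simp only [List.getElem_map, PySem.List.getElem_pyRange_one, List.getElem_set,
      List.getElem_replicate]
    split_ifs <;> first | rfl | omega

theorem print_n_spec : Claim_equal_print_n := by
  intro size _
  unfold Spec_print_n print_n print_n_alt
  simp only []
  rw [pv_foldl_app (fun i =>
      (PySem.List.pyRange 1 (size+1) 1).foldl (fun line j =>
        if j = 1 ∨ j = size ∨ i = j then line ++ "* " else line ++ "  ") ""),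
    pv_foldl_app (fun i => PySem.Str.join ""
      (PySem.List.pySetD (PySem.List.pySetD (PySem.List.pySetD
        (PySem.List.pyRepeat ["  "] size) 0 "* ") (size-1) "* ") (i-1) "* "))]
  simp only [List.nil_append]
  apply List.map_congr_left
  intro i hi
  rw [PySem.List.mem_pyRange_one] at hi
  apply String.toList_inj.mp
  have hfn : (fun (line : String) (j : Int) =>
        if j = 1 ∨ j = size ∨ i = j then line ++ "* " else line ++ "  ")
      = (fun (line : String) (j : Int) =>
        line ++ if j = 1 ∨ j = size ∨ i = j then "* " else "  ") := by
    funext line j; split <;> rfl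
  rw [hfn, pv_foldl_str, PySem.Str.toList_join]
  simp only [String.toList_empty, List.nil_append]
  rw [pv_join_nil]
  rw [← pv_row_eq size i hi.1 (by omega), List.map_map]
  rfl
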